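-- pv_equiv track=rewrite | github.com/Kirabin/Exercises | codewars/python/kyu4/strip_comments.py | solution
-- ===== SOURCE A (Python) =====
-- def solution(strings, markers):
--
-- 	res = []
-- 	for string in strings.split("\n"):
--
-- 		new_str = ""
-- 		for char in string:
-- 			if char in markers:
-- 				break
-- 			new_str += char
--
-- 		res.append(new_str.rstrip())
--
-- 	return "\n".join(res)
-- ===== SOURCE B (Python) =====
-- def solution(strings, markers):
--     # Single pass over the whole input with a "skipping" flag instead of
--     # split-into-lines + per-line char scan with break.
--     res = []
--     cur = []
--     skipping = False
--     for ch in strings: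
--         if ch == "\n":
--             res.append("".join(cur).rstrip())
--             cur = []
--             skipping = False
--         elif not skipping:
--             if ch in markers:
--                 skipping = True
--             else:
--                 cur.append(ch)
--     res.append("".join(cur).rstrip())
--     return "\n".join(res)
-- ===== Notes on version B (the rewrite author's own statement) =====
-- stated objective: alternative
-- what changed: Replaces split-into-lines plus a per-line char scan with break by a single pass over the whole string using a skipping flag that is reset at each newline.
import Mathlib
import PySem

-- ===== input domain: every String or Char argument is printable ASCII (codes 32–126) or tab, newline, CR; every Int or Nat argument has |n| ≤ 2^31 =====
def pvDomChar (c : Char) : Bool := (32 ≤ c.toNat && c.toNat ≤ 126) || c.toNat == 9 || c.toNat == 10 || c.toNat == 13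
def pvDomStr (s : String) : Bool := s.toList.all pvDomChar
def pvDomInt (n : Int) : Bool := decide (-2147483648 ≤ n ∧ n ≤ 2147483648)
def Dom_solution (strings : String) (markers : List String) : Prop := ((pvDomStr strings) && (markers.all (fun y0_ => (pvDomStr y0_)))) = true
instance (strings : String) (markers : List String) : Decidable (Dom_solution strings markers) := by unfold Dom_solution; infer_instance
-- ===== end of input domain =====

-- B replaces A's split-into-lines + per-line char scan with a single pass over the
-- whole string driven by a "skipping" flag (objective: alternative single-pass
-- structure; same asymptotic cost).

-- ===== PORT A =====
-- inner loop "for char in string: if char in markers: break; new_str += char"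
def scanA (markers : List String) : List Char → List Char
  | [] => []
  | c :: rest => if markers.contains (String.ofList [c]) then [] else c :: scanA markers rest

def solution (strings : String) (markers : List String) : String :=
  String.ofList (PySem.Chars.join ['\n']
    ((PySem.Chars.splitOn strings.toList ['\n']).foldl
      (fun (res : List (List Char)) string =>
        res ++ [PySem.Chars.rstrip (scanA markers string)]) []))

-- ===== PORT B =====
-- one fold step of Source B's loop; state = (finished lines, current kept chars, skipping)
def stepB (markers : List String) (st : List (List Char) × List Char × Bool) (ch : Char) :
    List (List Char) × List Char × Bool :=
  if ch = '\n' then (st.1 ++ [PySem.Chars.rstrip st.2.1], [], false)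
  else if st.2.2 then st
  else if markers.contains (String.ofList [ch]) then (st.1, st.2.1, true)
  else (st.1, st.2.1 ++ [ch], false)

def solution_alt (strings : String) (markers : List String) : String :=
  String.ofList (PySem.Chars.join ['\n']
    ((strings.toList.foldl (stepB markers) ([], [], false)).1
      ++ [PySem.Chars.rstrip (strings.toList.foldl (stepB markers) ([], [], false)).2.1]))

-- ===== PRECONDITION & SPEC =====
def Spec_solution (strings : String) (markers : List String) (out : String) : Prop := out = solution_alt strings markers
instance (strings : String) (markers : List String) (out : String) : Decidable (Spec_solution strings markers out) := by unfold Spec_solution; infer_instance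

-- ===== CLAIM (what is proved, stated in full; the proofs are below) =====
def Claim_equal_solution : Prop := ∀ (strings : String) (markers : List String), Dom_solution strings markers → Spec_solution strings markers (solution strings markers)

-- ===== LEMMAS AND PROOFS =====

/-- (first line up to the first '\n', the remaining lines). -/
def linesOf : List Char → List Char × List (List Char)
  | [] => ([], [])
  | a :: l => if a = '\n' then ([], (linesOf l).1 :: (linesOf l).2)
              else (a :: (linesOf l).1, (linesOf l).2)

theorem splitOn_go_newline (l : List Char) : ∀ (fuel : Nat) (cur : List Char)
    (acc : List (List Char)), l.length ≤ fuel →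
    PySem.Chars.splitOn.go ['\n'] fuel l cur acc
      = acc.reverse ++ (cur.reverse ++ (linesOf l).1) :: (linesOf l).2 := by
  induction l with
  | nil =>
    intro fuel cur acc _
    cases fuel <;> simp [PySem.Chars.splitOn.go, linesOf]
  | cons a rest ih =>
    intro fuel cur acc hle
    cases fuel with
    | zero => simp at hle
    | succ f =>
      have hr : rest.length ≤ f := by simpa using hle
      by_cases ha : a = '\n'
      · subst ha
        have hpre : List.isPrefixOf ['\n'] ('\n' :: rest) = true := by
          simp [List.isPrefixOf]
        simp only [PySem.Chars.splitOn.go, hpre, if_true, List.length_cons,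
          List.length_nil, List.drop_succ_cons, List.drop_zero]
        rw [ih f [] (cur.reverse :: acc) (by simpa using hr)]
        simp [linesOf]
      · have hpre : List.isPrefixOf ['\n'] (a :: rest) = false := by
          simp [List.isPrefixOf, Ne.symm ha]
        simp only [PySem.Chars.splitOn.go, hpre, Bool.false_eq_true, if_false]
        rw [ih f (a :: cur) acc hr]
        simp [linesOf, ha]

theorem splitOn_newline (l : List Char) :
    PySem.Chars.splitOn l ['\n'] = (linesOf l).1 :: (linesOf l).2 := by
  unfold PySem.Chars.splitOn
  rw [splitOn_go_newline l (l.length + 1) [] [] (by omega)]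
  simp

theorem foldl_append_map {α β : Type} (f : α → β) :
    ∀ (xs : List α) (res : List β),
      xs.foldl (fun r x => r ++ [f x]) res = res ++ xs.map f := by
  intro xs
  induction xs with
  | nil => simp
  | cons x xs ih => intro res; simp [List.foldl_cons, ih]

/-- Joint invariant for B's fold in the non-skipping and skipping states. -/
theorem foldB_inv (markers : List String) (l : List Char) :
    ∀ (res : List (List Char)) (cur : List Char),
      ((let st := l.foldl (stepB markers) (res, cur, false)
        st.1 ++ [PySem.Chars.rstrip st.2.1])
         = res ++ PySem.Chars.rstrip (cur ++ scanA markers (linesOf l).1)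
             :: (linesOf l).2.map (fun s => PySem.Chars.rstrip (scanA markers s)))
    ∧ ((let st := l.foldl (stepB markers) (res, cur, true)
        st.1 ++ [PySem.Chars.rstrip st.2.1])
         = res ++ PySem.Chars.rstrip cur
             :: (linesOf l).2.map (fun s => PySem.Chars.rstrip (scanA markers s))) := by
  induction l with
  | nil =>
    intro res cur
    constructor <;> simp [linesOf, scanA]
  | cons a rest ih =>
    intro res cur
    by_cases ha : a = '\n'
    · subst ha
      have hsF : stepB markers (res, cur, false) '\n'
          = (res ++ [PySem.Chars.rstrip cur], [], false) := by simp [stepB]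
      have hsT : stepB markers (res, cur, true) '\n'
          = (res ++ [PySem.Chars.rstrip cur], [], false) := by simp [stepB]
      constructor
      · simp only [List.foldl_cons, hsF]
        rw [(ih (res ++ [PySem.Chars.rstrip cur]) []).1]
        simp [linesOf, scanA]
      · simp only [List.foldl_cons, hsT]
        rw [(ih (res ++ [PySem.Chars.rstrip cur]) []).1]
        simp [linesOf]
    · have hsT : stepB markers (res, cur, true) a = (res, cur, true) := by
        simp [stepB, ha]
      by_cases hm : markers.contains (String.ofList [a]) = true
      · have hm'' : String.ofList [a] ∈ markers := by simpa using hm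
        have hsF : stepB markers (res, cur, false) a = (res, cur, true) := by
          simp [stepB, ha, hm'']
        constructor
        · simp only [List.foldl_cons, hsF]
          rw [(ih res cur).2]
          simp [linesOf, ha, scanA, hm'']
        · simp only [List.foldl_cons, hsT]
          rw [(ih res cur).2]
          simp [linesOf, ha]
      · have hm' : ¬ String.ofList [a] ∈ markers := by simpa using hm
        have hsF : stepB markers (res, cur, false) a = (res, cur ++ [a], false) := by
          simp [stepB, ha, hm']
        constructor
        · simp only [List.foldl_cons, hsF]
          rw [(ih res (cur ++ [a])).1]
          simp [linesOf, ha, scanA, hm']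
        · simp only [List.foldl_cons, hsT]
          rw [(ih res cur).2]
          simp [linesOf, ha]

-- ===== VERDICT (by name: the statement is the Claim_ definition above) =====
theorem solution_spec : Claim_equal_solution := by
  intro strings markers _
  show solution strings markers = solution_alt strings markers
  unfold solution solution_alt
  rw [splitOn_newline, foldl_append_map]
  rw [(foldB_inv markers strings.toList [] []).1]
  simp
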